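-- pv_equiv track=rewrite | github.com/pmoracho/pboletin | tboletin.py | simplificar
-- ===== SOURCE A (Python) =====
-- def simplificar(mylista):
--
--     aprox = {0:{}, 1:{}}
--
--     for i in (0,1):
--       valor = list(sum(list(zip(*[(e[0+i], e[2+i]) for e in mylista])), ()))
--       for e in valor:
--         if e not in aprox[i]:
--           aprox[i].update({e-5:e,e-4:e,e-3:e,e-2:e,e-1:e,e-0:e,e+1:e,e+2:e,e+3:e,e+4:e,e+5:e})
--
--     for i,e in enumerate(mylista):
--
--       mylista[i][0] = aprox[0][e[0]]
--       mylista[i][1] = aprox[1][e[1]]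
--       mylista[i][2] = aprox[0][e[2]]
--       mylista[i][3] = aprox[1][e[3]]
--
--     return(mylista)
-- ===== SOURCE B (Python) =====
-- def simplificar(mylista):
--     # For each axis: collect distinct values (first-occurrence order), then a
--     # forward overwrite pass: each value not yet assigned becomes a representative
--     # and claims every distinct value within distance 5 (later reps overwrite).
--     def axis_map(seq):
--         seen = set()
--         distinct = []
--         for v in seq:
--             if v not in seen:
--                 seen.add(v)
--                 distinct.append(v)
--         assign = {}
--         for v in distinct:
--             if v not in assign:
--                 for u in distinct:
--                     if -5 <= u - v <= 5:
--                         assign[u] = v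
--         return assign
--     m0 = axis_map([r[0] for r in mylista] + [r[2] for r in mylista])
--     m1 = axis_map([r[1] for r in mylista] + [r[3] for r in mylista])
--     for r in mylista:
--         r[0], r[1], r[2], r[3] = m0[r[0]], m1[r[1]], m0[r[2]], m1[r[3]]
--     return mylista
-- ===== Notes on version B (the rewrite author's own statement) =====
-- stated objective: alternative
-- what changed: B replaces A's 11-key expanded window dict (and the zip/sum transpose) with a distinct-value list per axis and a forward overwrite pass: each value not yet assigned becomes a representative and claims every distinct value within distance 5, later representatives overwriting earlier ones; rows are then remapped by direct value lookup.
import Mathlib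
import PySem

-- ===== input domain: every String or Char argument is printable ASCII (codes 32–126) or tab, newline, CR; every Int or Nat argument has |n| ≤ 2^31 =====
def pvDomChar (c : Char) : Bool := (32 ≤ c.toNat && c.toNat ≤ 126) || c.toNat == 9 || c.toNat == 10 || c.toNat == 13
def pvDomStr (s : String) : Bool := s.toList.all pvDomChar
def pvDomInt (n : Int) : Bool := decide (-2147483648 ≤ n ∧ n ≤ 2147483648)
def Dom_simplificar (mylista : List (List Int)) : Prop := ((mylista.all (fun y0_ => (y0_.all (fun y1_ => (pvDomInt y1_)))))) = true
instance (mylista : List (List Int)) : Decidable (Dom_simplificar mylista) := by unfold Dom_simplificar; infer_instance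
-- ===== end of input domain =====

-- B replaces A's 11-key expanded window dict with a distinct-value list and a forward
-- overwrite pass (each new representative claims every distinct value within 5); same
-- return value. A mutates its argument in place; the claim is about the return value only.

-- ===== PORT A =====
-- row[k] for 0 ≤ k < len(row); the .getD 0 only totalizes (Pre_ guarantees length ≥ 4)
def pvGet (row : List Int) (k : Int) : Int := (PySem.List.pyGet? row k).getD 0

-- aprox[i].update({e-5:e, …, e+5:e})
def pvAIns (d : PySem.Dict Int Int) (e : Int) : PySem.Dict Int Int :=
  ((((((((((d.insert (e-5) e).insert (e-4) e).insert (e-3) e).insert (e-2) e).insert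
      (e-1) e).insert (e-0) e).insert (e+1) e).insert (e+2) e).insert (e+3) e).insert
      (e+4) e).insert (e+5) e

-- the inner 'for e in valor' loop
def pvABuild (valor : List Int) : PySem.Dict Int Int :=
  valor.foldl (fun d e => if d.contains e then d else pvAIns d e) PySem.Dict.empty

def simplificar (mylista : List (List Int)) : List (List Int) :=
  -- valor = list(sum(list(zip(*[(e[0+i], e[2+i]) for e in mylista])), ())): all e[i], then all e[2+i]
  let valor0 := mylista.map (fun e => pvGet e 0) ++ mylista.map (fun e => pvGet e 2)
  let valor1 := mylista.map (fun e => pvGet e 1) ++ mylista.map (fun e => pvGet e 3)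
  let a0 := pvABuild valor0
  let a1 := pvABuild valor1
  -- in-place assignment loop: each index is read (original value) before it is written
  mylista.map (fun e =>
    ((((e.set 0 ((a0.get? (pvGet e 0)).getD 0)).set 1 ((a1.get? (pvGet e 1)).getD 0)).set
        2 ((a0.get? (pvGet e 2)).getD 0)).set 3 ((a1.get? (pvGet e 3)).getD 0)))

-- ===== PORT B =====
-- the seen/distinct loop (the Python 'seen' set holds exactly distinct's elements,
-- so 'v not in seen' is ported as the membership test on the accumulated list)
def pvDistinct (seq : List Int) : List Int :=
  seq.foldl (fun acc v => if acc.contains v then acc else acc ++ [v]) []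

-- 'for v in distinct: if v not in assign: for u in distinct: if -5 <= u - v <= 5: assign[u] = v'
def pvAxisAssign (D : List Int) : PySem.Dict Int Int :=
  D.foldl (fun a v =>
    if a.contains v then a
    else D.foldl (fun a u => if -5 ≤ u - v ∧ u - v ≤ 5 then a.insert u v else a) a)
    PySem.Dict.empty

def simplificar_alt (mylista : List (List Int)) : List (List Int) :=
  let seq0 := mylista.map (fun r => pvGet r 0) ++ mylista.map (fun r => pvGet r 2)
  let seq1 := mylista.map (fun r => pvGet r 1) ++ mylista.map (fun r => pvGet r 3)
  let m0 := pvAxisAssign (pvDistinct seq0)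
  let m1 := pvAxisAssign (pvDistinct seq1)
  mylista.map (fun r =>
    ((((r.set 0 ((m0.get? (pvGet r 0)).getD 0)).set 1 ((m1.get? (pvGet r 1)).getD 0)).set
        2 ((m0.get? (pvGet r 2)).getD 0)).set 3 ((m1.get? (pvGet r 3)).getD 0)))

-- ===== PRECONDITION & SPEC =====
-- Pre_ excludes exactly the inputs on which the Python A raises IndexError:
-- some row has fewer than 4 elements. (B raises there as well.)
def Pre_simplificar (mylista : List (List Int)) : Prop :=
  (mylista.all (fun row => 4 ≤ row.length)) = true
instance (mylista : List (List Int)) : Decidable (Pre_simplificar mylista) := by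
  unfold Pre_simplificar; infer_instance

def pvWitness_simplificar : List (List Int) := [[0, 1, 2, 3], [4, 100, 6, 103]]

def Spec_simplificar (mylista : List (List Int)) (out : List (List Int)) : Prop := out = simplificar_alt mylista
instance (mylista : List (List Int)) (out : List (List Int)) : Decidable (Spec_simplificar mylista out) := by unfold Spec_simplificar; infer_instance

-- ===== CLAIM (what is proved, stated in full; the proofs are below) =====
def Claim_equal_simplificar : Prop := ∀ (mylista : List (List Int)), Dom_simplificar mylista → Pre_simplificar mylista → Spec_simplificar mylista (simplificar mylista)

-- ===== LEMMAS AND PROOFS =====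

-- proof-only: the greedy representative list both programs implicitly realize
def pvReps (seq : List Int) : List Int :=
  seq.foldl (fun rs v => if rs.any (fun r => decide (-5 ≤ v - r ∧ v - r ≤ 5)) then rs else rs ++ [v]) []

-- proof-only: recursive form of pvDistinct
def pvDdp (seen seq : List Int) : List Int :=
  match seq with
  | [] => []
  | v :: t => if seen.contains v then pvDdp seen t else v :: pvDdp (seen ++ [v]) t

-- the 11 window inserts behave as one guarded lookup
set_option maxHeartbeats 1000000 in
lemma pvAIns_get (d : PySem.Dict Int Int) (e v : Int) :
    (pvAIns d e).get? v = if -5 ≤ v - e ∧ v - e ≤ 5 then some e else d.get? v := by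
  unfold pvAIns
  simp only [PySem.Dict.get?_insert]
  split_ifs <;> first | rfl | omega

-- A-side loop invariant: the dict lookup equals a reversed find? over the greedy reps
set_option maxHeartbeats 1000000 in
lemma pvABuild_invariant (seq : List Int) (d : PySem.Dict Int Int) (rs : List Int)
    (h : ∀ v, d.get? v = rs.reverse.find? (fun r => decide (-5 ≤ v - r ∧ v - r ≤ 5))) :
    ∀ v, (seq.foldl (fun d e => if d.contains e then d else pvAIns d e) d).get? v =
      ((seq.foldl (fun rs v => if rs.any (fun r => decide (-5 ≤ v - r ∧ v - r ≤ 5)) then rs else rs ++ [v]) rs).reverse.find?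
        (fun r => decide (-5 ≤ v - r ∧ v - r ≤ 5))) := by
  induction seq generalizing d rs with
  | nil => exact h
  | cons e rest ih =>
    have hc : d.contains e = rs.any (fun r => decide (-5 ≤ e - r ∧ e - r ≤ 5)) := by
      rw [PySem.Dict.contains_eq_isSome_get?, h e, List.isSome_find?, List.any_reverse]
    simp only [List.foldl_cons, hc]
    by_cases hb : rs.any (fun r => decide (-5 ≤ e - r ∧ e - r ≤ 5)) = true
    · rw [if_pos hb, if_pos hb]
      exact ih d rs h
    · rw [if_neg hb, if_neg hb]
      refine ih (pvAIns d e) (rs ++ [e]) ?_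
      intro v
      rw [pvAIns_get, List.reverse_append]
      simp only [List.reverse_singleton, List.singleton_append, List.find?_cons]
      by_cases hv : -5 ≤ v - e ∧ v - e ≤ 5
      · have hd : (decide (e ≤ v + 5) && decide (v ≤ 5 + e)) = true := by
          simp only [Bool.and_eq_true, decide_eq_true_eq]; omega
        simp [hv]
      · have hd : (decide (e ≤ v + 5) && decide (v ≤ 5 + e)) = false := by
          simp only [Bool.and_eq_false_iff, decide_eq_false_iff_not]; omega
        simp [hd, h v]
        intro h1 h2
        exfalso; omega

lemma pvABuild_get (seq : List Int) (v : Int) :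
    (pvABuild seq).get? v = (pvReps seq).reverse.find? (fun r => decide (-5 ≤ v - r ∧ v - r ≤ 5)) := by
  unfold pvABuild pvReps
  exact pvABuild_invariant seq PySem.Dict.empty [] (fun v => by simp) v

-- B-side inner fold: all inserts carry value v, so the result is a guarded lookup
lemma pvInner_get (D : List Int) (a : PySem.Dict Int Int) (v w : Int) :
    (D.foldl (fun a u => if -5 ≤ u - v ∧ u - v ≤ 5 then a.insert u v else a) a).get? w =
      if w ∈ D ∧ (-5 ≤ w - v ∧ w - v ≤ 5) then some v else a.get? w := by
  induction D generalizing a with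
  | nil => simp
  | cons u rest ih =>
    simp only [List.foldl_cons, ih]
    by_cases h1 : w ∈ rest ∧ (-5 ≤ w - v ∧ w - v ≤ 5)
    · simp [h1, List.mem_cons]
    · simp only [if_neg h1]
      by_cases h2 : -5 ≤ u - v ∧ u - v ≤ 5
      · rw [if_pos h2, PySem.Dict.get?_insert]
        by_cases h3 : w = u
        · subst h3; simp [h2]
        · simp only [if_neg h3]
          have : ¬ (w ∈ u :: rest ∧ (-5 ≤ w - v ∧ w - v ≤ 5)) := by
            simp only [List.mem_cons]; tauto
          rw [if_neg this]
      · rw [if_neg h2]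
        have : ¬ (w ∈ u :: rest ∧ (-5 ≤ w - v ∧ w - v ≤ 5)) := by
          simp only [List.mem_cons]
          rintro ⟨(rfl | hm), hw⟩ <;> tauto
        rw [if_neg this]

-- B-side outer loop invariant: the assign dict equals a reversed find? over the greedy reps
lemma pvAssign_invariant (L D : List Int) (a : PySem.Dict Int Int) (rs : List Int)
    (hsub : ∀ x ∈ L, x ∈ D)
    (h : ∀ u ∈ D, a.get? u = rs.reverse.find? (fun r => decide (-5 ≤ u - r ∧ u - r ≤ 5))) :
    ∀ u ∈ D,
      (L.foldl (fun a v =>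
        if a.contains v then a
        else D.foldl (fun a u => if -5 ≤ u - v ∧ u - v ≤ 5 then a.insert u v else a) a) a).get? u =
      ((L.foldl (fun rs v => if rs.any (fun r => decide (-5 ≤ v - r ∧ v - r ≤ 5)) then rs else rs ++ [v]) rs).reverse.find?
        (fun r => decide (-5 ≤ u - r ∧ u - r ≤ 5))) := by
  induction L generalizing a rs with
  | nil => exact h
  | cons v t ih =>
    have hvD : v ∈ D := hsub v (List.mem_cons_self ..)
    have hc : a.contains v = rs.any (fun r => decide (-5 ≤ v - r ∧ v - r ≤ 5)) := by
      rw [PySem.Dict.contains_eq_isSome_get?, h v hvD, List.isSome_find?, List.any_reverse]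
    simp only [List.foldl_cons, hc]
    by_cases hb : rs.any (fun r => decide (-5 ≤ v - r ∧ v - r ≤ 5)) = true
    · rw [if_pos hb, if_pos hb]
      exact ih a rs (fun x hx => hsub x (List.mem_cons_of_mem _ hx)) h
    · rw [if_neg hb, if_neg hb]
      refine ih _ (rs ++ [v]) (fun x hx => hsub x (List.mem_cons_of_mem _ hx)) ?_
      intro u huD
      rw [pvInner_get, List.reverse_append]
      simp only [List.reverse_singleton, List.singleton_append, List.find?_cons]
      by_cases hu : -5 ≤ u - v ∧ u - v ≤ 5
      · have hd : (decide (v ≤ u + 5) && decide (u ≤ 5 + v)) = true := by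
          simp only [Bool.and_eq_true, decide_eq_true_eq]; omega
        simp [hu, huD]
      · have hne : ¬ (u ∈ D ∧ (-5 ≤ u - v ∧ u - v ≤ 5)) := by tauto
        have hd : (decide (v ≤ u + 5) && decide (u ≤ 5 + v)) = false := by
          simp only [Bool.and_eq_false_iff, decide_eq_false_iff_not]; omega
        simp [hd, h u huD]
        intro _ h1 h2
        exfalso; omega

-- pvDistinct equals the recursive dedup
lemma pvDistinct_eq_ddp_aux (seq : List Int) : ∀ acc,
    seq.foldl (fun acc v => if acc.contains v then acc else acc ++ [v]) acc
      = acc ++ pvDdp acc seq := by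
  induction seq with
  | nil => intro acc; simp [pvDdp]
  | cons v t ih =>
    intro acc
    simp only [List.foldl_cons, pvDdp]
    by_cases hc : acc.contains v = true
    · rw [if_pos hc, if_pos hc, ih]
    · rw [if_neg hc, if_neg hc, ih]
      simp

lemma mem_pvDistinct (seq : List Int) (x : Int) (hx : x ∈ seq) : x ∈ pvDistinct seq := by
  unfold pvDistinct
  have aux : ∀ (s acc : List Int), x ∈ s ∨ x ∈ acc →
      x ∈ s.foldl (fun acc v => if acc.contains v then acc else acc ++ [v]) acc := by
    intro s
    induction s with
    | nil => intro acc h; simpa using h.resolve_left (by simp)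
    | cons v t ih =>
      intro acc h
      simp only [List.foldl_cons]
      by_cases hc : acc.contains v = true
      · rw [if_pos hc]
        refine ih acc ?_
        rcases h with h | h
        · rcases List.mem_cons.1 h with rfl | h
          · exact Or.inr (by simpa using hc)
          · exact Or.inl h
        · exact Or.inr h
      · rw [if_neg hc]
        refine ih (acc ++ [v]) ?_
        rcases h with h | h
        · rcases List.mem_cons.1 h with rfl | h
          · exact Or.inr (by simp)
          · exact Or.inl h
        · exact Or.inr (by simp [h])
  exact aux seq [] (Or.inl hx)

-- deduplication does not change the greedy reps (seen values are always covered)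
lemma reps_ddp (seq : List Int) : ∀ (seen rs : List Int),
    (∀ x ∈ seen, rs.any (fun r => decide (-5 ≤ x - r ∧ x - r ≤ 5)) = true) →
    (pvDdp seen seq).foldl (fun rs v => if rs.any (fun r => decide (-5 ≤ v - r ∧ v - r ≤ 5)) then rs else rs ++ [v]) rs
      = seq.foldl (fun rs v => if rs.any (fun r => decide (-5 ≤ v - r ∧ v - r ≤ 5)) then rs else rs ++ [v]) rs := by
  induction seq with
  | nil => intro seen rs _; simp [pvDdp]
  | cons v t ih =>
    intro seen rs hcov
    simp only [pvDdp, List.foldl_cons]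
    by_cases hs : seen.contains v = true
    · rw [if_pos hs]
      have hv := hcov v (by simpa using hs)
      rw [ih seen rs hcov, if_pos hv]
    · rw [if_neg hs]
      simp only [List.foldl_cons]
      refine ih (seen ++ [v]) _ ?_
      intro x hx
      rcases List.mem_append.1 hx with hx | hx
      · have := hcov x hx
        by_cases hb : rs.any (fun r => decide (-5 ≤ v - r ∧ v - r ≤ 5)) = true
        · rwa [if_pos hb]
        · rw [if_neg hb, List.any_append]
          simp only [this, Bool.true_or]
      · have hxv : x = v := by simpa using hx
        subst hxv
        by_cases hb : rs.any (fun r => decide (-5 ≤ x - r ∧ x - r ≤ 5)) = true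
        · rwa [if_pos hb]
        · rw [if_neg hb, List.any_append]
          simp
  
-- key lemma: on every value occurring in seq, B's assign dict agrees with A's window dict
lemma assign_eq_abuild (seq : List Int) (v : Int) (hv : v ∈ seq) :
    (pvAxisAssign (pvDistinct seq)).get? v = (pvABuild seq).get? v := by
  have hvD : v ∈ pvDistinct seq := mem_pvDistinct seq v hv
  have h1 := pvAssign_invariant (pvDistinct seq) (pvDistinct seq) PySem.Dict.empty []
      (fun x hx => hx) (fun u _ => by simp) v hvD
  have h2 : pvDistinct seq = pvDdp [] seq := by
    unfold pvDistinct
    rw [pvDistinct_eq_ddp_aux seq, List.nil_append]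
  rw [pvABuild_get]
  unfold pvAxisAssign
  rw [h1]
  unfold pvReps
  rw [h2, reps_ddp seq [] [] (by simp)]

-- ===== VERDICT (by name: the statement is the Claim_ definition above) =====
theorem simplificar_spec : Claim_equal_simplificar := by
  intro mylista _ _
  unfold Spec_simplificar simplificar simplificar_alt
  refine List.map_congr_left ?_
  intro r hr
  have h0 := assign_eq_abuild (mylista.map (fun e => pvGet e 0) ++ mylista.map (fun e => pvGet e 2))
      (pvGet r 0) (List.mem_append.2 (Or.inl (List.mem_map.2 ⟨r, hr, rfl⟩)))
  have h2 := assign_eq_abuild (mylista.map (fun e => pvGet e 0) ++ mylista.map (fun e => pvGet e 2))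
      (pvGet r 2) (List.mem_append.2 (Or.inr (List.mem_map.2 ⟨r, hr, rfl⟩)))
  have h1 := assign_eq_abuild (mylista.map (fun e => pvGet e 1) ++ mylista.map (fun e => pvGet e 3))
      (pvGet r 1) (List.mem_append.2 (Or.inl (List.mem_map.2 ⟨r, hr, rfl⟩)))
  have h3 := assign_eq_abuild (mylista.map (fun e => pvGet e 1) ++ mylista.map (fun e => pvGet e 3))
      (pvGet r 3) (List.mem_append.2 (Or.inr (List.mem_map.2 ⟨r, hr, rfl⟩)))
  rw [h0, h1, h2, h3]
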